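-- pv_equiv track=rewrite | github.com/bminixhofer/zett | zett/utils.py | default_pretokenize
-- ===== SOURCE A (Python) =====
-- def default_pretokenize(text):
--     # very conservative default pre-tokenization, split such that there is never whitespace at the end of a token (but allowed at the start)
--     # we need this because e.g. Llama tokenizer does not specify any pre-tokenization (in the HF version)
--
--     tokens = []
--     token = ""
--     has_non_whitespace = False
--
--     for c in text:
--         if c.isspace():
--             if has_non_whitespace:
--                 tokens.append((token, None))
--                 token = ""
--                 has_non_whitespace = False
--         else:
--             has_non_whitespace = True
--
--         token += c
--
--     if len(token) > 0:
--         tokens.append((token, None))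
--
--     return tokens
-- ===== SOURCE B (Python) =====
-- from itertools import groupby
--
-- def default_pretokenize(text):
--     # run-based: group chars into whitespace / non-whitespace runs
--     tokens = []
--     pending = ""
--     for is_ws, group in groupby(text, key=str.isspace):
--         run = "".join(group)
--         if is_ws:
--             pending = run
--         else:
--             tokens.append((pending + run, None))
--             pending = ""
--     if pending:
--         tokens.append((pending, None))
--     return tokens
-- ===== Notes on version B (the rewrite author's own statement) =====
-- stated objective: alternative
-- what changed: Replaced the char-by-char accumulator-and-flag state machine with run-based processing: itertools.groupby splits the text into whitespace/non-whitespace runs and a pending whitespace run is attached to the following non-whitespace run.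
import Mathlib
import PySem

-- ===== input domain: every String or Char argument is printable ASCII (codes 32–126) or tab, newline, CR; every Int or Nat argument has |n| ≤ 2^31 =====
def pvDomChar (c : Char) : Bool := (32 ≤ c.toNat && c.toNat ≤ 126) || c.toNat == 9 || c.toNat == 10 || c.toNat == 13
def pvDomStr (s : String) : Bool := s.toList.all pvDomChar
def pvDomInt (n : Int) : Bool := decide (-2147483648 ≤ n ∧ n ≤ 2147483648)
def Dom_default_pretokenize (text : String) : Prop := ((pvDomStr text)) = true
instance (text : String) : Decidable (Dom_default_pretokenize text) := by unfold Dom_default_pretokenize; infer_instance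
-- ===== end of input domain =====

-- B replaces A's char-by-char accumulator/flag state machine by run-based processing
-- (group the text into maximal whitespace / non-whitespace runs, attach a pending
-- whitespace run to the following non-whitespace run); objective: alternative decomposition.


-- ===== PORT A =====
-- one step of A's loop; state = (tokens, token, has_non_whitespace)
def pvStepA (st : List (String × Option String) × List Char × Bool) (c : Char) :
    List (String × Option String) × List Char × Bool :=
  let (tokens, token, hnw) := st
  if PySem.Chars.isspace c then
    if hnw then (tokens ++ [(String.mk token, none)], [c], false)
    else (tokens, token ++ [c], hnw)
  else (tokens, token ++ [c], true)

-- A's trailing `if len(token) > 0: tokens.append((token, None))`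
def pvFinishA (st : List (String × Option String) × List Char × Bool) :
    List (String × Option String) :=
  if st.2.1.length > 0 then st.1 ++ [(String.mk st.2.1, none)] else st.1

def default_pretokenize (text : String) : List (String × Option String) :=
  pvFinishA (text.toList.foldl pvStepA ([], [], false))

-- ===== PORT B =====
-- itertools.groupby(text, key=str.isspace): maximal runs of equal isspace-key
def pvRuns : List Char → List (Bool × List Char)
  | [] => []
  | c :: cs =>
    let k := PySem.Chars.isspace c
    (k, c :: cs.takeWhile (fun x => PySem.Chars.isspace x == k)) ::
      pvRuns (cs.dropWhile (fun x => PySem.Chars.isspace x == k))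
termination_by l => l.length
decreasing_by
  simp only [List.length_cons]
  exact Nat.lt_succ_of_le (List.length_dropWhile_le _ _)

-- B's loop over the runs, carrying the pending whitespace run, plus its final flush
def pvBGo : List (Bool × List Char) → List Char → List (String × Option String)
  | [], pending => if pending.isEmpty then [] else [(String.mk pending, none)]
  | (ws, r) :: rs, pending =>
    if ws then pvBGo rs r
    else (String.mk (pending ++ r), none) :: pvBGo rs []

def default_pretokenize_alt (text : String) : List (String × Option String) :=
  pvBGo (pvRuns text.toList) []

-- ===== PRECONDITION & SPEC =====
def Spec_default_pretokenize (text : String) (out : List (String × Option String)) : Prop := out = default_pretokenize_alt text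
instance (text : String) (out : List (String × Option String)) : Decidable (Spec_default_pretokenize text out) := by unfold Spec_default_pretokenize; infer_instance

-- ===== CLAIM (what is proved, stated in full; the proofs are below) =====
def Claim_equal_default_pretokenize : Prop := ∀ (text : String), Dom_default_pretokenize text → Spec_default_pretokenize text (default_pretokenize text)

-- ===== LEMMAS AND PROOFS =====

-- head of a dropWhile fails the predicate
theorem pv_dropWhile_head {q : Char → Bool} :
    ∀ (cs : List Char) {c' : Char} {d' : List Char},
      cs.dropWhile q = c' :: d' → q c' = false := by
  intro cs
  induction cs with
  | nil => intro c' d' h; simp [List.dropWhile] at h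
  | cons a as ih =>
    intro c' d' h
    by_cases ha : q a = true
    · rw [List.dropWhile_cons_of_pos ha] at h; exact ih h
    · rw [List.dropWhile_cons_of_neg ha] at h
      cases h; simpa using ha

-- A's step on a whitespace char with the flag off just accumulates
theorem pv_step_ws_off (ts : List (String × Option String)) (p : List Char) {c : Char}
    (hc : PySem.Chars.isspace c = true) :
    pvStepA (ts, p, false) c = (ts, p ++ [c], false) := by
  simp [pvStepA, hc]

-- fold of A's step over a whitespace run from a flag-off state just accumulates
theorem pv_fold_ws : ∀ (r : List Char) (ts : List (String × Option String)) (p : List Char),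
    (∀ c ∈ r, PySem.Chars.isspace c = true) →
    List.foldl pvStepA (ts, p, false) r = (ts, p ++ r, false) := by
  intro r
  induction r with
  | nil => intro ts p _; simp
  | cons c cs ih =>
    intro ts p h
    rw [List.foldl_cons, pv_step_ws_off ts p (h c (by simp)),
        ih ts (p ++ [c]) (fun x hx => h x (by simp [hx]))]
    simp

-- fold of A's step over a non-whitespace run from a flag-on state just accumulates
theorem pv_fold_nws : ∀ (r : List Char) (ts : List (String × Option String)) (p : List Char),
    (∀ c ∈ r, PySem.Chars.isspace c = false) →
    List.foldl pvStepA (ts, p, true) r = (ts, p ++ r, true) := by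
  intro r
  induction r with
  | nil => intro ts p _; simp
  | cons c cs ih =>
    intro ts p h
    have hc : PySem.Chars.isspace c = false := h c (by simp)
    have hstep : pvStepA (ts, p, true) c = (ts, p ++ [c], true) := by
      simp [pvStepA, hc]
    rw [List.foldl_cons, hstep, ih ts (p ++ [c]) (fun x hx => h x (by simp [hx]))]
    simp

-- main invariant: A's loop-and-finish from state (ts, p, false) equals ts ++ B's run loop,
-- provided p may only be non-empty when the next char (if any) is non-whitespace
theorem pv_main : ∀ (n : Nat) (l : List Char), l.length ≤ n →
    ∀ (p : List Char) (ts : List (String × Option String)),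
    (p ≠ [] → ∀ c, l.head? = some c → PySem.Chars.isspace c = false) →
    pvFinishA (List.foldl pvStepA (ts, p, false) l) = ts ++ pvBGo (pvRuns l) p := by
  intro n
  induction n with
  | zero =>
    intro l hl p ts _
    have hln : l = [] := by
      cases l with
      | nil => rfl
      | cons a b => simp at hl
    subst hln
    simp only [List.foldl_nil, pvRuns, pvBGo, pvFinishA]
    cases p <;> simp
  | succ n ih =>
    intro l hl p ts hp
    cases l with
    | nil =>
      simp only [List.foldl_nil, pvRuns, pvBGo, pvFinishA]
      cases p <;> simp
    | cons c cs =>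
      have hcs : cs.length ≤ n := by simpa using hl
      by_cases hc : PySem.Chars.isspace c = true
      · -- leading whitespace run; p must be empty
        have hp0 : p = [] := by
          by_contra h
          exact absurd (hp h c rfl) (by simp [hc])
        subst hp0
        set t := cs.takeWhile (fun x => PySem.Chars.isspace x == true) with ht
        set d := cs.dropWhile (fun x => PySem.Chars.isspace x == true) with hd
        clear_value t d
        have hsplit : cs = t ++ d := by
          rw [ht, hd]; exact (List.takeWhile_append_dropWhile).symm
        have hws : ∀ x ∈ c :: t, PySem.Chars.isspace x = true := by
          intro x hx
          rcases List.mem_cons.mp hx with rfl | hx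
          · exact hc
          · have := List.mem_takeWhile_imp (ht ▸ hx)
            simpa using this
        have hruns : pvRuns (c :: cs) = (true, c :: t) :: pvRuns d := by
          simp only [pvRuns, hc]
          rw [← ht, ← hd]
        have hfold : List.foldl pvStepA (ts, [], false) (c :: cs) =
            List.foldl pvStepA (ts, c :: t, false) d := by
          rw [show (c :: cs) = (c :: t) ++ d by simp [hsplit], List.foldl_append,
              pv_fold_ws (c :: t) ts [] hws]
          simp
        have hdlen : d.length ≤ n :=
          le_trans (hd ▸ List.length_dropWhile_le _ cs) hcs
        have hinv : (c :: t ≠ []) → ∀ x, d.head? = some x → PySem.Chars.isspace x = false := by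
          intro _ x hx
          cases d with
          | nil => simp at hx
          | cons a b =>
            have ha := pv_dropWhile_head cs hd.symm
            simp only [List.head?_cons, Option.some.injEq] at hx
            subst hx
            simpa using ha
        rw [hfold, ih d hdlen (c :: t) ts hinv, hruns]
        rfl
      · -- leading non-whitespace run
        have hc' : PySem.Chars.isspace c = false := by simpa using hc
        set t := cs.takeWhile (fun x => PySem.Chars.isspace x == false) with ht
        set d := cs.dropWhile (fun x => PySem.Chars.isspace x == false) with hd
        clear_value t d
        have hsplit : cs = t ++ d := by
          rw [ht, hd]; exact (List.takeWhile_append_dropWhile).symm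
        have hnws : ∀ x ∈ t, PySem.Chars.isspace x = false := by
          intro x hx
          have := List.mem_takeWhile_imp (ht ▸ hx)
          simpa using this
        have hruns : pvRuns (c :: cs) = (false, c :: t) :: pvRuns d := by
          simp only [pvRuns, hc']
          rw [← ht, ← hd]
        have hfold1 : List.foldl pvStepA (ts, p, false) (c :: t) =
            (ts, p ++ c :: t, true) := by
          have hstep : pvStepA (ts, p, false) c = (ts, p ++ [c], true) := by
            simp [pvStepA, hc']
          rw [List.foldl_cons, hstep, pv_fold_nws t ts (p ++ [c]) hnws]
          simp
        have hfold : List.foldl pvStepA (ts, p, false) (c :: cs) =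
            List.foldl pvStepA (ts, p ++ c :: t, true) d := by
          rw [show (c :: cs) = (c :: t) ++ d by simp [hsplit], List.foldl_append, hfold1]
        rw [hfold, hruns]
        cases d with
        | nil =>
          simp [pvFinishA, pvBGo, pvRuns]
        | cons c' d' =>
          have hc'ws : PySem.Chars.isspace c' = true := by
            have := pv_dropWhile_head cs hd.symm
            simpa using this
          have hstep : pvStepA (ts, p ++ c :: t, true) c' =
              (ts ++ [(String.mk (p ++ c :: t), none)], [c'], false) := by
            simp [pvStepA, hc'ws]
          set t2 := d'.takeWhile (fun x => PySem.Chars.isspace x == true) with ht2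
          set d2 := d'.dropWhile (fun x => PySem.Chars.isspace x == true) with hd2
          clear_value t2 d2
          have hsplit2 : d' = t2 ++ d2 := by
            rw [ht2, hd2]; exact (List.takeWhile_append_dropWhile).symm
          have hws2 : ∀ x ∈ t2, PySem.Chars.isspace x = true := by
            intro x hx
            have := List.mem_takeWhile_imp (ht2 ▸ hx)
            simpa using this
          have hrunsd : pvRuns (c' :: d') = (true, c' :: t2) :: pvRuns d2 := by
            simp only [pvRuns, hc'ws]
            rw [← ht2, ← hd2]
          have hfold2 : List.foldl pvStepA (ts, p ++ c :: t, true) (c' :: d') =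
              List.foldl pvStepA (ts ++ [(String.mk (p ++ c :: t), none)], c' :: t2, false) d2 := by
            rw [show (c' :: d') = (c' :: t2) ++ d2 by simp [hsplit2], List.foldl_append]
            rw [List.foldl_cons, hstep, pv_fold_ws t2 _ [c'] hws2]
            rfl
          have hd2len : d2.length ≤ n := by
            have h1 : d2.length ≤ d'.length := hd2 ▸ List.length_dropWhile_le _ d'
            have h2 : t.length + (d'.length + 1) = cs.length := by
              rw [hsplit]; simp
            omega
          have hinv2 : (c' :: t2 ≠ []) → ∀ x, d2.head? = some x → PySem.Chars.isspace x = false := by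
            intro _ x hx
            cases d2 with
            | nil => simp at hx
            | cons a b =>
              have ha := pv_dropWhile_head d' hd2.symm
              simp only [List.head?_cons, Option.some.injEq] at hx
              subst hx
              simpa using ha
          rw [hfold2, ih d2 hd2len (c' :: t2) (ts ++ [(String.mk (p ++ c :: t), none)]) hinv2,
              hrunsd]
          simp [pvBGo]

-- ===== VERDICT (by name: the statement is the Claim_ definition above) =====
theorem default_pretokenize_spec : Claim_equal_default_pretokenize := by
  intro text _dom
  unfold Spec_default_pretokenize default_pretokenize default_pretokenize_alt
  exact pv_main text.toList.length text.toList le_rfl [] [] (by intro h; exact absurd rfl h)
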